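-- pv_equiv track=rewrite | github.com/TrippleCCC/COMP_550_PROJECT_5 | example.py | blockedLeft
-- ===== SOURCE A (Python) =====
-- obstacles = [ ]
--
-- def touchLeft(position):
--         return position[1] == 0
--
-- def blockedLeft(position, box):
--         for b in box:
--                 if position[1] == b[1] + 1 and position[0] == b[0] and (blockedLeft(b, box) or touchLeft(b)):
--                         return True
--         for o in obstacles:
--                 if position[1] == o[1] + 1 and position[0] == o[0]:
--                         return True
--         return False
-- ===== SOURCE B (Python) =====
-- obstacles = [ ]
--
-- def blockedLeft(position, box):
--     # Iterative left-walk instead of recursion: follow the chain of boxes one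
--     # column at a time until an obstacle, a gap, or the wall (column 0).
--     r, c = position[0], position[1]
--     while True:
--         c -= 1
--         if any(o[1] == c and o[0] == r for o in obstacles):
--             return True
--         nb = next((b for b in box if b[1] == c and b[0] == r), None)
--         if nb is None:
--             return False
--         if nb[1] == 0:
--             return True
--         c = nb[1]
-- ===== Notes on version B (the rewrite author's own statement) =====
-- stated objective: alternative
-- what changed: Replaces A's recursion (which re-scans the whole box list at every level and recurses on each left-adjacent box) with an explicit iterative walk along the row: keep the current column, step one cell left, return True on an obstacle or a wall-touching box, False on a gap.
-- outside the precondition, e.g. on blockedLeft((), []): A returns False, B raises IndexError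
import Mathlib
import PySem

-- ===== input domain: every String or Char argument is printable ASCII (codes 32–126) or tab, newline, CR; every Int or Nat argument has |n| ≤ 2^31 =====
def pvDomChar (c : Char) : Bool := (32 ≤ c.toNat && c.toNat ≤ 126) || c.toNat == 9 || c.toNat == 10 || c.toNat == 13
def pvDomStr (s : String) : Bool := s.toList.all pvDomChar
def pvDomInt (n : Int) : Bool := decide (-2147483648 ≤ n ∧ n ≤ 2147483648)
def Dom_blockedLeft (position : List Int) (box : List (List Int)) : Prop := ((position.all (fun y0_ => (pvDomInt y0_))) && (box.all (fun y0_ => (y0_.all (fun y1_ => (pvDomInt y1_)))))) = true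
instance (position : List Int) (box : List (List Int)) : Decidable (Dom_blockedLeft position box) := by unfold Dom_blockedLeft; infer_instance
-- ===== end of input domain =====

-- B replaces A's recursion with an explicit iterative walk left along the row
-- (objective: alternative decomposition, same asymptotic cost).

-- xs[i] for the literal nonnegative indices 0/1 used by both programs; on inputs
-- admitted by Pre_ the index is always in range, so the .getD 0 default is never used.
def pvGetD (l : List Int) (i : Int) : Int := (PySem.List.pyGet? l i).getD 0

-- ===== PORT A =====
def pvObstacles : List (List Int) := []

def pvTouchLeft (position : List Int) : Bool := pvGetD position 1 == 0

-- fuel = box.length + 1 is a totality guard only: A's recursion steps one column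
-- left per level and each level needs a box at a fresh column, so depth ≤ box.length.
def blockedLeftFuel : Nat → List Int → List (List Int) → Bool
  | 0, _, _ => false
  | n+1, position, box =>
      (box.any (fun b =>
        (pvGetD position 1 == pvGetD b 1 + 1) && (pvGetD position 0 == pvGetD b 0)
          && (blockedLeftFuel n b box || pvTouchLeft b)))
      || (pvObstacles.any (fun o =>
        (pvGetD position 1 == pvGetD o 1 + 1) && (pvGetD position 0 == pvGetD o 0)))

def blockedLeft (position : List Int) (box : List (List Int)) : Bool :=
  blockedLeftFuel (box.length + 1) position box

-- ===== PORT B =====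
-- fuel = box.length + 1 is a totality guard only: the column strictly decreases each
-- iteration, so at most box.length iterations can find a box before a gap or the wall.
def pvWalkLeft : Nat → Int → Int → List (List Int) → Bool
  | 0, _, _, _ => false
  | n+1, r, c, box =>
      let c' := c - 1
      if pvObstacles.any (fun o => (pvGetD o 1 == c') && (pvGetD o 0 == r)) then true
      else
        match box.find? (fun b => (pvGetD b 1 == c') && (pvGetD b 0 == r)) with
        | none => false
        | some nb => if pvGetD nb 1 == 0 then true else pvWalkLeft n r (pvGetD nb 1) box

def blockedLeft_alt (position : List Int) (box : List (List Int)) : Bool :=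
  pvWalkLeft (box.length + 1) (pvGetD position 0) (pvGetD position 1) box

-- ===== PRECONDITION & SPEC =====
-- Pre_ excludes exactly the inputs where the Python programs index past a list end:
-- A raises IndexError whenever box is nonempty and position or some box entry has
-- fewer than 2 elements; it also excludes box = [] with a short position, where A's
-- False is an accident of the loops being vacuous and B naturally raises IndexError.
def Pre_blockedLeft (position : List Int) (box : List (List Int)) : Prop :=
  2 ≤ position.length ∧ ∀ b ∈ box, 2 ≤ b.length
instance (position : List Int) (box : List (List Int)) : Decidable (Pre_blockedLeft position box) := by unfold Pre_blockedLeft; infer_instance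

def pvWitness_blockedLeft : List Int × List (List Int) := ([0, 1], [[0, 0]])

def Spec_blockedLeft (position : List Int) (box : List (List Int)) (out : Bool) : Prop := out = blockedLeft_alt position box
instance (position : List Int) (box : List (List Int)) (out : Bool) : Decidable (Spec_blockedLeft position box out) := by unfold Spec_blockedLeft; infer_instance

-- ===== CLAIM (what is proved, stated in full; the proofs are below) =====
def Claim_equal_blockedLeft : Prop := ∀ (position : List Int) (box : List (List Int)), Dom_blockedLeft position box → Pre_blockedLeft position box → Spec_blockedLeft position box (blockedLeft position box)

-- ===== LEMMAS AND PROOFS =====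

-- A's match condition and B's find? predicate agree.
theorem pv_cond_eq (P1 P0 x y : Int) :
    ((P1 == x + 1) && (P0 == y)) = ((x == P1 - 1) && (y == P0)) := by
  rw [Bool.eq_iff_iff]
  simp only [Bool.and_eq_true, beq_iff_eq]
  omega

-- A's `any` over "condition ∧ verdict" equals B's find?-then-verdict, provided the
-- verdict is the same for every element satisfying the condition.
theorem pv_any_eq_find {α : Type} (l : List α) (p q v : α → Bool) (V : Bool)
    (hpq : ∀ b ∈ l, p b = q b) (hv : ∀ b ∈ l, q b = true → v b = V) :
    l.any (fun b => p b && v b)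
      = (match l.find? q with | none => false | some _ => V) := by
  induction l with
  | nil => rfl
  | cons a t ih =>
      have hpa : p a = q a := hpq a (by simp)
      have ih' := ih (fun b hb => hpq b (List.mem_cons_of_mem _ hb))
        (fun b hb => hv b (List.mem_cons_of_mem _ hb))
      cases hq : q a with
      | true =>
          have hva : v a = V := hv a (by simp) hq
          have htail : t.any (fun b => p b && v b) = true → V = true := by
            intro ht
            rcases List.any_eq_true.mp ht with ⟨b, hb, hpv⟩
            have hpv' : p b = true ∧ v b = true := by simpa using hpv
            have hqb : q b = true := (hpq b (List.mem_cons_of_mem _ hb)) ▸ hpv'.1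
            have := hv b (List.mem_cons_of_mem _ hb) hqb
            rw [← this, hpv'.2]
          rw [List.any_cons, List.find?_cons_of_pos hq, hpa, hq, hva, Bool.true_and]
          cases hV : V with
          | true => simp
          | false =>
              rw [Bool.false_or]
              cases h : t.any (fun b => p b && v b) with
              | false => rfl
              | true => exact absurd (hV ▸ htail h) (by simp)
      | false =>
          rw [List.any_cons, List.find?_cons_of_neg (by simp [hq]), hpa, hq,
            Bool.false_and, Bool.false_or]
          exact ih'

-- Main invariant: at equal fuel, A's recursion and B's walk agree, with the walk
-- started at position's coordinates.
theorem pv_key : ∀ (n : Nat) (position : List Int) (box : List (List Int)),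
    blockedLeftFuel n position box
      = pvWalkLeft n (pvGetD position 0) (pvGetD position 1) box := by
  intro n
  induction n with
  | zero => intro position box; rfl
  | succ n ih =>
      intro position box
      set P0 := pvGetD position 0 with hP0
      set P1 := pvGetD position 1 with hP1
      have hstep :
          box.any (fun b =>
            (P1 == pvGetD b 1 + 1) && (P0 == pvGetD b 0)
              && (blockedLeftFuel n b box || pvTouchLeft b))
          = (match box.find? (fun b => (pvGetD b 1 == P1 - 1) && (pvGetD b 0 == P0)) with
             | none => false
             | some nb => if pvGetD nb 1 == 0 then true
                          else pvWalkLeft n P0 (pvGetD nb 1) box) := by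
        have h1 := pv_any_eq_find box
          (fun b => (P1 == pvGetD b 1 + 1) && (P0 == pvGetD b 0))
          (fun b => (pvGetD b 1 == P1 - 1) && (pvGetD b 0 == P0))
          (fun b => blockedLeftFuel n b box || pvTouchLeft b)
          (pvWalkLeft n P0 (P1 - 1) box || ((P1 - 1 : Int) == 0))
          (fun b _ => pv_cond_eq P1 P0 (pvGetD b 1) (pvGetD b 0))
          (fun b _ hb => by
            have hb' : pvGetD b 1 = P1 - 1 ∧ pvGetD b 0 = P0 := by simpa using hb
            simp only [pvTouchLeft, ih b box, hb'.1, hb'.2])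
        rw [h1]
        cases hf : box.find? (fun b => (pvGetD b 1 == P1 - 1) && (pvGetD b 0 == P0)) with
        | none => rfl
        | some nb =>
            have hq := List.find?_some hf
            have hq' : pvGetD nb 1 = P1 - 1 ∧ pvGetD nb 0 = P0 := by simpa using hq
            cases h0 : ((P1 - 1 : Int) == 0) <;> simp [hq'.1, h0]
      simp only [blockedLeftFuel, pvWalkLeft, pvObstacles, List.any_nil, Bool.or_false,
        Bool.false_eq_true, if_false]
      exact hstep

-- ===== VERDICT (by name: the statement is the Claim_ definition above) =====
theorem blockedLeft_spec : Claim_equal_blockedLeft := by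
  intro position box _ _
  show blockedLeft position box = blockedLeft_alt position box
  exact pv_key (box.length + 1) position box
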